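-- pv_equiv track=rewrite | github.com/takeharukato/ansibleConfigGenerator | src/genAnsibleConf/lib/netif_builder.py | derive_gateway_dns_fallback_scalars
-- ===== SOURCE A (Python) =====
-- from typing import Any
--
-- def derive_gateway_dns_fallback_scalars(netif_list: list[dict[str, Any]]) -> dict[str, Any]:
--     """gateway 設定を持つ NIC から fallback スカラーを導出する。
--
--     Args:
--         netif_list (list[dict[str, Any]]): netif エントリ配列である。
--
--     Returns:
--         dict[str, Any]: fallback 用 gateway/DNS スカラー辞書である。
--
--     Examples:
--         >>> derive_gateway_dns_fallback_scalars([{"gateway4": "10.0.0.1", "name_server_ipv4_1": "8.8.8.8"}])["ipv4_name_server1"]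
--         '8.8.8.8'
--     """
--     source: dict[str, Any] | None = None
--     for netif in netif_list:
--         if 'gateway4' in netif or 'gateway6' in netif:
--             source = netif
--             break
--
--     if source is None:
--         return {}
--
--     out: dict[str, Any] = {}
--     direct_keys: tuple[str, ...] = ('gateway4', 'gateway6', 'dns_search')
--     for key in direct_keys:
--         if key in source:
--             out[key] = source[key]
--
--     mapping: dict[str, str] = {
--         'name_server_ipv4_1': 'ipv4_name_server1',
--         'name_server_ipv4_2': 'ipv4_name_server2',
--         'name_server_ipv6_1': 'ipv6_name_server1',
--         'name_server_ipv6_2': 'ipv6_name_server2',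
--     }
--     for src_key, dst_key in mapping.items():
--         if src_key in source:
--             out[dst_key] = source[src_key]
--
--     return out
-- ===== SOURCE B (Python) =====
-- _POS = {'gateway4': 0, 'gateway6': 1, 'dns_search': 2,
--         'name_server_ipv4_1': 3, 'name_server_ipv4_2': 4,
--         'name_server_ipv6_1': 5, 'name_server_ipv6_2': 6}
-- _OUT = ('gateway4', 'gateway6', 'dns_search',
--         'ipv4_name_server1', 'ipv4_name_server2',
--         'ipv6_name_server1', 'ipv6_name_server2')
--
--
-- def derive_gateway_dns_fallback_scalars(netif_list):
--     source = next((n for n in netif_list if 'gateway4' in n or 'gateway6' in n), None)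
--     if source is None:
--         return {}
--     slots = [None] * len(_OUT)
--     for key, value in source.items():
--         pos = _POS.get(key)
--         if pos is not None:
--             slots[pos] = value
--     return {_OUT[i]: v for i, v in enumerate(slots) if v is not None}
-- ===== Notes on version B (the rewrite author's own statement) =====
-- stated objective: alternative
-- what changed: Instead of two loops over fixed schema key lists with membership tests into the source dict, B makes one data-driven pass over the source's own items, filling a fixed direct-address slot array via a key-to-position map, and then emits the non-empty slots in slot order.
import Mathlib
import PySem

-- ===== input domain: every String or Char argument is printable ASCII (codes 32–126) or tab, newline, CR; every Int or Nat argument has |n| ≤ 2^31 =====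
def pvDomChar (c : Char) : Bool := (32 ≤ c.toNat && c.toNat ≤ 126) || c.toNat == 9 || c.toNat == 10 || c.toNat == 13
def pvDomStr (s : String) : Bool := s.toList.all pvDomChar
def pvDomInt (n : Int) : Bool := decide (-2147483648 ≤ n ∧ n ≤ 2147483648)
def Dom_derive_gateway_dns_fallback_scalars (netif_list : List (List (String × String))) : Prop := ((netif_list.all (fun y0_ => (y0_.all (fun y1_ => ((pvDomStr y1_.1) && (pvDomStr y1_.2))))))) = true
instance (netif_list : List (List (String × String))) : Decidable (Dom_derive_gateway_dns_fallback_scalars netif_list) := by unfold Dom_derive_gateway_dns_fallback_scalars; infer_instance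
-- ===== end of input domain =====

-- B replaces A's two schema-list copy loops by one data-driven pass over the source dict's
-- own items, filling a fixed direct-address slot array via a key-to-position map and
-- emitting non-empty slots in slot order (objective: alternative, same cost).


-- ===== PORT A =====
-- A's 'for netif in netif_list: … break' loop
def pvFindGw : List (List (String × String)) → Option (List (String × String))
  | [] => none
  | n :: rest =>
    if (PySem.Dict.mk n).contains "gateway4" || (PySem.Dict.mk n).contains "gateway6" then
      some n
    else pvFindGw rest

def derive_gateway_dns_fallback_scalars (netif_list : List (List (String × String))) : List (String × String) :=
  match pvFindGw netif_list with
  | none => []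
  | some source =>
    let src := PySem.Dict.mk source
    let out : PySem.Dict String String := PySem.Dict.empty
    let direct_keys : List String := ["gateway4", "gateway6", "dns_search"]
    let out := direct_keys.foldl
      (fun d key => if src.contains key then d.insert key (src.getD key "") else d) out
    let mapping : List (String × String) :=
      [("name_server_ipv4_1", "ipv4_name_server1"),
       ("name_server_ipv4_2", "ipv4_name_server2"),
       ("name_server_ipv6_1", "ipv6_name_server1"),
       ("name_server_ipv6_2", "ipv6_name_server2")]
    let out := mapping.foldl
      (fun d p => if src.contains p.1 then d.insert p.2 (src.getD p.1 "") else d) out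
    out.items

-- ===== PORT B =====
-- _POS : the key-to-slot-position dict
def pvPos (k : String) : Option Nat :=
  (PySem.Dict.mk [("gateway4", 0), ("gateway6", 1), ("dns_search", 2),
    ("name_server_ipv4_1", 3), ("name_server_ipv4_2", 4),
    ("name_server_ipv6_1", 5), ("name_server_ipv6_2", 6)]).get? k

-- _OUT : the output key of each slot
def pvOut : List String :=
  ["gateway4", "gateway6", "dns_search",
   "ipv4_name_server1", "ipv4_name_server2", "ipv6_name_server1", "ipv6_name_server2"]

-- loop body of 'for key, value in source.items(): …'
def pvStep (sl : List (Option String)) (p : String × String) : List (Option String) :=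
  match pvPos p.1 with
  | some pos => sl.set pos (some p.2)
  | none => sl

def derive_gateway_dns_fallback_scalars_alt (netif_list : List (List (String × String))) : List (String × String) :=
  match netif_list.find?
      (fun n => (PySem.Dict.mk n).contains "gateway4" || (PySem.Dict.mk n).contains "gateway6") with
  | none => []
  | some source =>
    let slots := (PySem.Dict.mk source).items.foldl pvStep (List.replicate pvOut.length none)
    (PySem.List.enumerate slots).filterMap
      (fun iv => iv.2.map (fun v => (PySem.List.pyGetD pvOut iv.1 "", v)))

-- ===== PRECONDITION & SPEC =====
-- Pre_ excludes inner association lists with duplicate keys: the Python parameter is a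
-- list of dicts, and a duplicate-keyed association list represents no Python dict.
def Pre_derive_gateway_dns_fallback_scalars (netif_list : List (List (String × String))) : Prop :=
  ∀ n ∈ netif_list, (n.map Prod.fst).Nodup
instance (netif_list : List (List (String × String))) : Decidable (Pre_derive_gateway_dns_fallback_scalars netif_list) := by unfold Pre_derive_gateway_dns_fallback_scalars; infer_instance

def pvWitness_derive_gateway_dns_fallback_scalars : (List (List (String × String))) :=
  [[("gateway4", "10.0.0.1"), ("name_server_ipv4_1", "8.8.8.8")]]

def Spec_derive_gateway_dns_fallback_scalars (netif_list : List (List (String × String))) (out : List (String × String)) : Prop := out = derive_gateway_dns_fallback_scalars_alt netif_list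
instance (netif_list : List (List (String × String))) (out : List (String × String)) : Decidable (Spec_derive_gateway_dns_fallback_scalars netif_list out) := by unfold Spec_derive_gateway_dns_fallback_scalars; infer_instance

-- ===== CLAIM (what is proved, stated in full; the proofs are below) =====
def Claim_equal_derive_gateway_dns_fallback_scalars : Prop := ∀ (netif_list : List (List (String × String))), Dom_derive_gateway_dns_fallback_scalars netif_list → Pre_derive_gateway_dns_fallback_scalars netif_list → Spec_derive_gateway_dns_fallback_scalars netif_list (derive_gateway_dns_fallback_scalars netif_list)

-- ===== LEMMAS AND PROOFS =====

-- A's break-loop is List.find? with the same predicate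
theorem pvFindGw_eq_find? (l : List (List (String × String))) :
    pvFindGw l = l.find?
      (fun n => (PySem.Dict.mk n).contains "gateway4" || (PySem.Dict.mk n).contains "gateway6") := by
  induction l with
  | nil => rfl
  | cons n rest ih =>
    simp only [pvFindGw]
    split <;> rename_i h
    · simp only [PySem.Dict.contains] at h
      simp [h]
    · simp only [PySem.Dict.contains] at h
      simp [eq_false_of_ne_true h, ih]

-- the position dict as a decision chain
theorem pvPos_eq (k : String) : pvPos k =
    if k = "gateway4" then some 0 else if k = "gateway6" then some 1
    else if k = "dns_search" then some 2 else if k = "name_server_ipv4_1" then some 3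
    else if k = "name_server_ipv4_2" then some 4 else if k = "name_server_ipv6_1" then some 5
    else if k = "name_server_ipv6_2" then some 6 else none := by
  simp only [pvPos, PySem.Dict.get?, List.find?]
  split_ifs <;> simp_all [beq_eq_decide, eq_comm]

-- no two distinct keys share a slot position
theorem pvPos_inj (a b : String) (i : Nat) (ha : pvPos a = some i) (hb : pvPos b = some i) :
    a = b := by
  rw [pvPos_eq] at ha hb
  split_ifs at ha hb <;> simp_all <;> omega

-- the slot-filling loop preserves the array length
theorem pvFold_length (l : List (String × String)) (init : List (Option String)) :
    (l.foldl pvStep init).length = init.length := by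
  induction l generalizing init with
  | nil => rfl
  | cons p rest ih =>
    simp only [List.foldl_cons]
    rw [ih]
    unfold pvStep
    cases pvPos p.1 <;> simp

-- slotwise value of the filling loop over a duplicate-free item list
theorem pvFold_getElem? (l : List (String × String)) (init : List (Option String)) (i : Nat)
    (hnd : (l.map Prod.fst).Nodup) (hi : i < init.length) :
    (l.foldl pvStep init)[i]? =
      match l.find? (fun p => pvPos p.1 == some i) with
      | some p => some (some p.2)
      | none => init[i]? := by
  induction l generalizing init with
  | nil => simp
  | cons p rest ih =>
    simp only [List.map_cons, List.nodup_cons] at hnd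
    simp only [List.foldl_cons, List.find?_cons]
    cases hp : pvPos p.1 with
    | none =>
      have hstep : pvStep init p = init := by unfold pvStep; rw [hp]
      rw [hstep, ih init hnd.2 hi]
      simp
    | some j =>
      have hstep : pvStep init p = init.set j (some p.2) := by unfold pvStep; rw [hp]
      rw [hstep]
      by_cases hij : j = i
      · subst hij
        have hrest : rest.find? (fun q => pvPos q.1 == some j) = none := by
          rw [List.find?_eq_none]
          intro q hq
          simp only [beq_iff_eq]
          intro hqpos
          exact hnd.1 (pvPos_inj p.1 q.1 j hp hqpos ▸ List.mem_map_of_mem hq)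
        rw [ih (init.set j (some p.2)) hnd.2 (by simpa using hi), hrest]
        simp [List.getElem?_set_self hi]
      · have hb : (some j == some i) = false := by simp [hij]
        rw [hb]
        rw [ih (init.set j (some p.2)) hnd.2 (by simpa using hi)]
        cases hf : rest.find? (fun q => pvPos q.1 == some i) <;>
          simp [List.getElem?_set_ne hij]

-- the slot-i predicate of the filling loop tests exactly key K when pvPos K = some i
theorem pvPred_eq (K : String) (i : Nat) (h : pvPos K = some i) :
    (fun p : String × String => pvPos p.1 == some i)
      = (fun p : String × String => p.1 == K) := by
  funext p
  by_cases hpk : p.1 = K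
  · simp [hpk, h]
  · cases hq : pvPos p.1 with
    | none => simp [hpk]
    | some j =>
      by_cases hji : j = i
      · exact absurd (pvPos_inj p.1 K i (hji ▸ hq) h) hpk
      · simp [hpk, hji]

-- guarded insert-folds over a rename table, started from a dict disjoint from the
-- table's output keys, produce exactly the guarded filterMap of the table
theorem items_foldl_table (src : PySem.Dict String String) :
    ∀ (tbl : List (String × String)) (d : PySem.Dict String String),
    (tbl.map Prod.snd).Nodup →
    (∀ t ∈ tbl.map Prod.snd, d.contains t = false) →
    (tbl.foldl (fun d p => if src.contains p.1 then d.insert p.2 (src.getD p.1 "") else d) d).items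
      = d.items ++ tbl.filterMap
          (fun p => if src.contains p.1 then some (p.2, src.getD p.1 "") else none) := by
  intro tbl
  induction tbl with
  | nil => intro d _ _; simp
  | cons p rest ih =>
    intro d hnd hdis
    simp only [List.map_cons, List.nodup_cons] at hnd
    have hd1 : d.contains p.2 = false := hdis p.2 (by simp)
    simp only [List.foldl_cons, List.filterMap_cons]
    by_cases hc : src.contains p.1
    · simp only [hc, ite_true]
      rw [ih (d.insert p.2 (src.getD p.1 "")) hnd.2]
      · rw [PySem.Dict.items_insert_of_not_contains d (src.getD p.1 "") hd1]
        simp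
      · intro t ht
        rw [PySem.Dict.contains_insert]
        have ht2 : t ≠ p.2 := fun he => hnd.1 (he ▸ ht)
        simp [ht2, hdis t (by simp [ht])]
    · simp only [hc, ite_false, Bool.false_eq_true]
      exact ih d hnd.2 (fun t ht => hdis t (by simp [ht]))

-- ===== VERDICT (by name: the statement is the Claim_ definition above) =====
set_option maxHeartbeats 1600000 in
theorem derive_gateway_dns_fallback_scalars_spec : Claim_equal_derive_gateway_dns_fallback_scalars := by
  intro netif_list _ hpre
  unfold Spec_derive_gateway_dns_fallback_scalars
  unfold derive_gateway_dns_fallback_scalars derive_gateway_dns_fallback_scalars_alt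
  rw [pvFindGw_eq_find?]
  cases h : netif_list.find?
      (fun n => (PySem.Dict.mk n).contains "gateway4" || (PySem.Dict.mk n).contains "gateway6") with
  | none => rfl
  | some source =>
    have hnd : (source.map Prod.fst).Nodup := hpre source (List.mem_of_find?_eq_some h)
    simp only
    -- A's two folds over the literal schema lists are one fold over the combined table
    have hfold :
        ([("name_server_ipv4_1", "ipv4_name_server1"),
          ("name_server_ipv4_2", "ipv4_name_server2"),
          ("name_server_ipv6_1", "ipv6_name_server1"),
          ("name_server_ipv6_2", "ipv6_name_server2")].foldl
           (fun d p => if (PySem.Dict.mk source).contains p.1 then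
               d.insert p.2 ((PySem.Dict.mk source).getD p.1 "") else d)
           (["gateway4", "gateway6", "dns_search"].foldl
             (fun d key => if (PySem.Dict.mk source).contains key then
                 d.insert key ((PySem.Dict.mk source).getD key "") else d)
             PySem.Dict.empty))
        = [("gateway4", "gateway4"), ("gateway6", "gateway6"), ("dns_search", "dns_search"),
           ("name_server_ipv4_1", "ipv4_name_server1"),
           ("name_server_ipv4_2", "ipv4_name_server2"),
           ("name_server_ipv6_1", "ipv6_name_server1"),
           ("name_server_ipv6_2", "ipv6_name_server2")].foldl
            (fun d p => if (PySem.Dict.mk source).contains p.1 then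
                d.insert p.2 ((PySem.Dict.mk source).getD p.1 "") else d) PySem.Dict.empty := by
      simp only [List.foldl]
    rw [hfold,
        items_foldl_table (PySem.Dict.mk source) _ PySem.Dict.empty
          (by decide) (by intro t _; simp [PySem.Dict.contains_empty])]
    -- the slot array after the data-driven pass, slot by slot
    have hslots : (PySem.Dict.mk source).items.foldl pvStep (List.replicate pvOut.length none)
        = [(PySem.Dict.mk source).get? "gateway4", (PySem.Dict.mk source).get? "gateway6",
           (PySem.Dict.mk source).get? "dns_search", (PySem.Dict.mk source).get? "name_server_ipv4_1",
           (PySem.Dict.mk source).get? "name_server_ipv4_2", (PySem.Dict.mk source).get? "name_server_ipv6_1",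
           (PySem.Dict.mk source).get? "name_server_ipv6_2"] := by
      apply List.ext_getElem?
      intro i
      by_cases hi7 : i < 7
      · have hlen : i < (List.replicate pvOut.length (none : Option String)).length := by
          simpa [pvOut] using hi7
        rw [pvFold_getElem? source _ i hnd hlen]
        interval_cases i
        · rw [pvPred_eq "gateway4" 0 rfl]
          cases hf : source.find? (fun p => p.1 == "gateway4") <;> simp [PySem.Dict.get?, hf, pvOut]
        · rw [pvPred_eq "gateway6" 1 rfl]
          cases hf : source.find? (fun p => p.1 == "gateway6") <;> simp [PySem.Dict.get?, hf, pvOut]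
        · rw [pvPred_eq "dns_search" 2 rfl]
          cases hf : source.find? (fun p => p.1 == "dns_search") <;> simp [PySem.Dict.get?, hf, pvOut]
        · rw [pvPred_eq "name_server_ipv4_1" 3 rfl]
          cases hf : source.find? (fun p => p.1 == "name_server_ipv4_1") <;> simp [PySem.Dict.get?, hf, pvOut]
        · rw [pvPred_eq "name_server_ipv4_2" 4 rfl]
          cases hf : source.find? (fun p => p.1 == "name_server_ipv4_2") <;> simp [PySem.Dict.get?, hf, pvOut]
        · rw [pvPred_eq "name_server_ipv6_1" 5 rfl]
          cases hf : source.find? (fun p => p.1 == "name_server_ipv6_1") <;> simp [PySem.Dict.get?, hf, pvOut]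
        · rw [pvPred_eq "name_server_ipv6_2" 6 rfl]
          cases hf : source.find? (fun p => p.1 == "name_server_ipv6_2") <;> simp [PySem.Dict.get?, hf, pvOut]
      · have h1 : ((PySem.Dict.mk source).items.foldl pvStep
            (List.replicate pvOut.length none)).length = 7 := by
          rw [pvFold_length]; simp [pvOut]
        rw [List.getElem?_eq_none (by omega), List.getElem?_eq_none (by simp; omega)]
    rw [hslots]
    -- both sides are now explicit in the seven lookups; case on each
    simp only [List.filterMap_cons, List.filterMap_nil]
    simp only [PySem.Dict.contains_eq_isSome_get?, PySem.Dict.getD_eq_get?_getD]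
    generalize (PySem.Dict.mk source).get? "gateway4" = o0
    generalize (PySem.Dict.mk source).get? "gateway6" = o1
    generalize (PySem.Dict.mk source).get? "dns_search" = o2
    generalize (PySem.Dict.mk source).get? "name_server_ipv4_1" = o3
    generalize (PySem.Dict.mk source).get? "name_server_ipv4_2" = o4
    generalize (PySem.Dict.mk source).get? "name_server_ipv6_1" = o5
    generalize (PySem.Dict.mk source).get? "name_server_ipv6_2" = o6
    cases o0 <;> cases o1 <;> cases o2 <;> cases o3 <;> cases o4 <;> cases o5 <;> cases o6 <;> rfl
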